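-- pv_equiv track=rewrite | github.com/EndeavorEverlasting/AxTask | services/nodeweaver/upstream/utils/behavior_markov.py | build_transition_counts
-- ===== SOURCE A (Python) =====
-- from collections import defaultdict
-- from typing import Any, Dict, List
--
-- def build_transition_counts(ordered_states: List[str]) -> Dict[str, Dict[str, int]]:
--     """For each state s, count successors s -> next."""
--     out: Dict[str, Dict[str, int]] = defaultdict(lambda: defaultdict(int))
--     for i in range(len(ordered_states) - 1):
--         a, b = ordered_states[i], ordered_states[i + 1]
--         if not a or not b:
--             continue
--         out[a][b] += 1
--     return {k: dict(v) for k, v in out.items()}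
-- ===== SOURCE B (Python) =====
-- def build_transition_counts(ordered_states):
--     """For each state s, count successors s -> next."""
--     # Phase 1: extract the truthy adjacent pairs.
--     pairs = [(a, b) for a, b in zip(ordered_states, ordered_states[1:]) if a and b]
--     # Phase 2: group by counting — for each distinct source (first-occurrence order),
--     # for each distinct successor seen after it, count the pair's occurrences by scanning.
--     return {
--         a: {b: pairs.count((a, b))
--             for b in dict.fromkeys(b2 for a2, b2 in pairs if a2 == a)}
--         for a in dict.fromkeys(a for a, _ in pairs)
--     }
-- ===== Notes on version B (the rewrite author's own statement) =====
-- stated objective: alternative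
-- what changed: A increments a nested defaultdict while walking the list by index; B never increments anything: it extracts the filtered adjacent-pair list once and then builds the result by grouping-by-counting, i.e. for each distinct source state and distinct successor it computes the count with a fresh pairs.count scan.
import Mathlib
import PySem

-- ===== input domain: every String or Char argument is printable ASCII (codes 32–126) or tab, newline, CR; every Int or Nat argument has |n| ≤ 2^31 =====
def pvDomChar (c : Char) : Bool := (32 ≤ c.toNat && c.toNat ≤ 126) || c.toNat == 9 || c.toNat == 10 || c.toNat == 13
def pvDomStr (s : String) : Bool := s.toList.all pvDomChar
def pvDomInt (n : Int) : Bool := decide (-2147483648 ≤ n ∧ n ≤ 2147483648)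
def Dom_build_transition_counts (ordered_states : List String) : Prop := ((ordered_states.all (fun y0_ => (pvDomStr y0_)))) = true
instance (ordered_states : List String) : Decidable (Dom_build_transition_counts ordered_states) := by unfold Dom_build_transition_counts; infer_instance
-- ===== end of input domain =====

-- B replaces A's incremental nested-defaultdict counting by a non-incremental group-by-counting:
-- extract the filtered adjacent pairs once, then for each distinct source and successor
-- compute the count with a pairs.count scan (objective: alternative).

-- ===== PORT A =====
def build_transition_counts (ordered_states : List String) : List (String × List (String × Int)) :=
  -- for i in range(len(ordered_states) - 1): both indices are always in range,
  -- so pyGetD's default "" is never used and the port is exact.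
  let out : PySem.Dict String (PySem.Dict String Int) :=
    (PySem.List.pyRange 0 (PySem.List.len ordered_states - 1) 1).foldl
      (fun out i =>
        let a := PySem.List.pyGetD ordered_states i ""
        let b := PySem.List.pyGetD ordered_states (i + 1) ""
        if a == "" || b == "" then out
        else out.modify a PySem.Dict.empty (fun inner => inner.modify b 0 (· + 1)))
      PySem.Dict.empty
  out.items.map (fun kv => (kv.1, kv.2.items))

-- ===== PORT B =====
def build_transition_counts_alt (ordered_states : List String) : List (String × List (String × Int)) :=
  let pairs := (ordered_states.zip (PySem.List.slice ordered_states (some 1) none)).filter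
      (fun p => !(p.1 == "") && !(p.2 == ""))
  (PySem.List.dedup (pairs.map (·.1))).map (fun a =>
    (a, (PySem.List.dedup ((pairs.filter (fun p => p.1 == a)).map (·.2))).map
      (fun b => (b, (pairs.count (a, b) : Int)))))

-- ===== PRECONDITION & SPEC =====
def Spec_build_transition_counts (ordered_states : List String) (out : List (String × List (String × Int))) : Prop := out = build_transition_counts_alt ordered_states
instance (ordered_states : List String) (out : List (String × List (String × Int))) : Decidable (Spec_build_transition_counts ordered_states out) := by unfold Spec_build_transition_counts; infer_instance

-- ===== CLAIM (what is proved, stated in full; the proofs are below) =====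
def Claim_equal_build_transition_counts : Prop := ∀ (ordered_states : List String), Dom_build_transition_counts ordered_states → Spec_build_transition_counts ordered_states (build_transition_counts ordered_states)

-- ===== LEMMAS AND PROOFS =====

def pvNStep (d : PySem.Dict String (PySem.Dict String Int)) (p : String × String) :
    PySem.Dict String (PySem.Dict String Int) :=
  d.modify p.1 PySem.Dict.empty (fun inner => inner.modify p.2 0 (· + 1))

def pvInner (ps : List (String × String)) (a : String) : PySem.Dict String Int :=
  PySem.Dict.mk ((PySem.List.dedup ((ps.filter (fun q => q.1 == a)).map (·.2))).map
    (fun b => (b, (ps.count (a, b) : Int))))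

def pvF (ps : List (String × String)) : List (String × PySem.Dict String Int) :=
  (PySem.List.dedup (ps.map (·.1))).map (fun a => (a, pvInner ps a))

theorem pvMem_inner_keys (ps : List (String × String)) (a b : String) :
    b ∈ PySem.List.dedup ((ps.filter (fun q => q.1 == a)).map (·.2)) ↔ (a, b) ∈ ps := by
  rw [PySem.List.mem_dedup]
  simp only [List.mem_map, List.mem_filter, beq_iff_eq]
  constructor
  · rintro ⟨q, ⟨hq, hq1⟩, hq2⟩
    have : q = (a, b) := by cases q; simp_all
    exact this ▸ hq
  · intro h; exact ⟨(a, b), ⟨h, rfl⟩, rfl⟩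

theorem pvInner_keys (ps : List (String × String)) (a : String) :
    (pvInner ps a).keys = PySem.List.dedup ((ps.filter (fun q => q.1 == a)).map (·.2)) := by
  simp only [pvInner, PySem.Dict.keys, List.map_map]
  exact List.map_id'' (fun _ => rfl) _

theorem pvInner_append_ne (ps : List (String × String)) (p : String × String) (a : String)
    (h : a ≠ p.1) : pvInner (ps ++ [p]) a = pvInner ps a := by
  obtain ⟨p1, p2⟩ := p
  unfold pvInner
  have hf : (ps ++ [(p1, p2)]).filter (fun q => q.1 == a) = ps.filter (fun q => q.1 == a) := by
    rw [List.filter_append]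
    simp [Ne.symm h]
  rw [hf]
  congr 1
  apply List.map_congr_left
  intro b _
  have : (p1, p2) ≠ (a, b) := by simp_all
  simp [List.count_append, this]

theorem pvInner_append_self (ps : List (String × String)) (p : String × String) :
    pvInner (ps ++ [p]) p.1
      = (pvInner ps p.1).insert p.2 ((pvInner ps p.1).getD p.2 0 + 1) := by
  obtain ⟨p1, p2⟩ := p
  simp only
  have hnodup : (pvInner ps p1).keys.Nodup := by
    rw [pvInner_keys]; exact PySem.List.nodup_dedup _
  have hcont : (pvInner ps p1).contains p2
      = decide (p2 ∈ PySem.List.dedup ((ps.filter (fun q => q.1 == p1)).map (·.2))) := by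
    rw [PySem.Dict.contains_eq_decide_mem_keys, pvInner_keys]
  have hf : (ps ++ [(p1, p2)]).filter (fun q => q.1 == p1) = ps.filter (fun q => q.1 == p1) ++ [(p1, p2)] := by
    rw [List.filter_append]; simp
  by_cases hb : (p1, p2) ∈ ps
  · have hbmem : p2 ∈ PySem.List.dedup ((ps.filter (fun q => q.1 == p1)).map (·.2)) :=
      (pvMem_inner_keys ps p1 p2).2 hb
    have hmemit : (p2, (ps.count (p1, p2) : Int)) ∈ (pvInner ps p1).items := by
      simp only [pvInner]
      exact List.mem_map.2 ⟨p2, hbmem, rfl⟩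
    have hgetD : (pvInner ps p1).getD p2 0 = (ps.count (p1, p2) : Int) :=
      PySem.Dict.getD_of_mem_items _ hmemit hnodup 0
    have hcont' : (pvInner ps p1).contains p2 = true := by
      rw [hcont]; exact decide_eq_true hbmem
    apply PySem.Dict.ext
    rw [PySem.Dict.items_insert_of_contains _ _ hcont', hgetD]
    have hded : PySem.List.dedup (((ps.filter (fun q => q.1 == p1)) ++ [(p1, p2)]).map (·.2))
        = PySem.List.dedup ((ps.filter (fun q => q.1 == p1)).map (·.2)) := by
      rw [List.map_append, PySem.List.dedup_eq_ofList, PySem.List.dedup_eq_ofList,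
        List.map_singleton, PySem.Set.ofList_append_singleton, PySem.Set.add]
      have : PySem.Set.contains (PySem.Set.ofList ((ps.filter (fun q => q.1 == p1)).map (·.2))) p2 = true := by
        rw [PySem.List.dedup_eq_ofList] at hbmem
        exact (PySem.Set.contains_iff _ _).2 hbmem
      rw [if_pos this]
    simp only [pvInner, hf]
    rw [hded, List.map_map]
    apply List.map_congr_left
    intro b hbm
    by_cases hbp : b = p2
    · subst hbp
      simp [List.count_append]
    · have h1 : (p1, p2) ≠ (p1, b) := by
        intro he; injection he with _ h2; exact hbp h2.symm
      simp [Function.comp, hbp, List.count_append, h1]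
  · have hbmem : p2 ∉ PySem.List.dedup ((ps.filter (fun q => q.1 == p1)).map (·.2)) :=
      fun h => hb ((pvMem_inner_keys ps p1 p2).1 h)
    have hcont' : (pvInner ps p1).contains p2 = false := by
      rw [hcont]; exact decide_eq_false hbmem
    have hgetD : (pvInner ps p1).getD p2 0 = 0 := PySem.Dict.getD_of_not_contains _ _ hcont'
    apply PySem.Dict.ext
    rw [PySem.Dict.items_insert_of_not_contains _ _ hcont', hgetD]
    have hded : PySem.List.dedup (((ps.filter (fun q => q.1 == p1)) ++ [(p1, p2)]).map (·.2))
        = PySem.List.dedup ((ps.filter (fun q => q.1 == p1)).map (·.2)) ++ [p2] := by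
      rw [List.map_append, PySem.List.dedup_eq_ofList, PySem.List.dedup_eq_ofList,
        List.map_singleton, PySem.Set.ofList_append_singleton, PySem.Set.add]
      have : PySem.Set.contains (PySem.Set.ofList ((ps.filter (fun q => q.1 == p1)).map (·.2))) p2 = false := by
        rw [PySem.List.dedup_eq_ofList] at hbmem
        exact Bool.not_eq_true _ ▸ (fun h => hbmem ((PySem.Set.contains_iff _ _).1 h))
      rw [if_neg (by rw [this]; exact Bool.false_ne_true)]
    simp only [pvInner, hf]
    rw [hded, List.map_append]
    congr 1
    · apply List.map_congr_left
      intro b hbm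
      have hbp : b ≠ p2 := fun he => hbmem (he ▸ hbm)
      have h1 : (p1, p2) ≠ (p1, b) := by
        intro he; injection he with _ h2; exact hbp h2.symm
      simp [List.count_append, h1]
    · have hc0 : ps.count (p1, p2) = 0 := List.count_eq_zero.2 hb
      simp [List.count_append, hc0]

theorem pvInner_empty_of_not_mem (ps : List (String × String)) (p1 : String)
    (h : p1 ∉ ps.map (·.1)) : pvInner ps p1 = PySem.Dict.empty := by
  have hf : ps.filter (fun q => q.1 == p1) = [] := by
    apply List.filter_eq_nil_iff.2
    intro q hq
    simp only [beq_iff_eq]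
    exact fun he => h (List.mem_map.2 ⟨q, hq, he⟩)
  simp [pvInner, hf, PySem.Dict.empty, PySem.List.dedup_eq_ofList, PySem.Set.ofList]

theorem pvF_keys (ps : List (String × String)) :
    (PySem.Dict.mk (pvF ps) : PySem.Dict String (PySem.Dict String Int)).keys
      = PySem.List.dedup (ps.map (·.1)) := by
  simp only [pvF, PySem.Dict.keys, List.map_map]
  exact List.map_id'' (fun _ => rfl) _

theorem pvMain (ps : List (String × String)) :
    ps.foldl pvNStep PySem.Dict.empty = PySem.Dict.mk (pvF ps) := by
  induction ps using List.reverseRecOn with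
  | nil => rfl
  | append_singleton ps p ih =>
    rw [List.foldl_append, List.foldl_cons, List.foldl_nil, ih]
    obtain ⟨p1, p2⟩ := p
    have hnodup : (PySem.Dict.mk (pvF ps) : PySem.Dict String (PySem.Dict String Int)).keys.Nodup := by
      rw [pvF_keys]; exact PySem.List.nodup_dedup _
    have hcont : (PySem.Dict.mk (pvF ps) : PySem.Dict String (PySem.Dict String Int)).contains p1
        = decide (p1 ∈ PySem.List.dedup (ps.map (·.1))) := by
      rw [PySem.Dict.contains_eq_decide_mem_keys, pvF_keys]
    by_cases hmem : p1 ∈ ps.map (·.1)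
    · -- p1 already an outer key
      have hdmem : p1 ∈ PySem.List.dedup (ps.map (·.1)) := (PySem.List.mem_dedup _ _).2 hmem
      have hcont' : (PySem.Dict.mk (pvF ps) : PySem.Dict String (PySem.Dict String Int)).contains p1 = true := by
        rw [hcont]; exact decide_eq_true hdmem
      have hmemit : (p1, pvInner ps p1) ∈ (PySem.Dict.mk (pvF ps) : PySem.Dict String (PySem.Dict String Int)).items :=
        List.mem_map.2 ⟨p1, hdmem, rfl⟩
      have hgetD : (PySem.Dict.mk (pvF ps) : PySem.Dict String (PySem.Dict String Int)).getD p1 PySem.Dict.empty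
          = pvInner ps p1 := PySem.Dict.getD_of_mem_items _ hmemit hnodup _
      apply PySem.Dict.ext
      show (PySem.Dict.insert _ p1 _).items = _
      rw [PySem.Dict.items_insert_of_contains _ _ hcont', hgetD]
      have hded : PySem.List.dedup ((ps ++ [(p1, p2)]).map (·.1)) = PySem.List.dedup (ps.map (·.1)) := by
        rw [List.map_append, List.map_singleton, PySem.List.dedup_eq_ofList, PySem.List.dedup_eq_ofList,
          PySem.Set.ofList_append_singleton, PySem.Set.add]
        have : PySem.Set.contains (PySem.Set.ofList (ps.map (·.1))) p1 = true := by
          exact (PySem.Set.contains_iff _ _).2 (by rw [PySem.List.dedup_eq_ofList] at hdmem; exact hdmem)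
        rw [if_pos this]
      simp only [pvF, hded, List.map_map]
      apply List.map_congr_left
      intro a ha
      by_cases hap : a = p1
      · subst hap
        have := pvInner_append_self ps (a, p2)
        simp only [Function.comp, beq_self_eq_true, if_pos]
        simp only at this
        rw [this]
        rfl
      · have : (pvInner ps a) = pvInner (ps ++ [(p1, p2)]) a := (pvInner_append_ne ps (p1, p2) a hap).symm
        simp [Function.comp, hap, ← this]
    · -- fresh outer key
      have hdmem : p1 ∉ PySem.List.dedup (ps.map (·.1)) := fun h => hmem ((PySem.List.mem_dedup _ _).1 h)
      have hcont' : (PySem.Dict.mk (pvF ps) : PySem.Dict String (PySem.Dict String Int)).contains p1 = false := by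
        rw [hcont]; exact decide_eq_false hdmem
      apply PySem.Dict.ext
      show (PySem.Dict.insert _ p1 _).items = _
      rw [PySem.Dict.items_insert_of_not_contains _ _ hcont']
      rw [PySem.Dict.getD_of_not_contains _ _ hcont']
      have hded : PySem.List.dedup ((ps ++ [(p1, p2)]).map (·.1))
          = PySem.List.dedup (ps.map (·.1)) ++ [p1] := by
        rw [List.map_append, List.map_singleton, PySem.List.dedup_eq_ofList, PySem.List.dedup_eq_ofList,
          PySem.Set.ofList_append_singleton, PySem.Set.add]
        have : PySem.Set.contains (PySem.Set.ofList (ps.map (·.1))) p1 = false := by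
          rw [PySem.List.dedup_eq_ofList] at hdmem
          exact Bool.not_eq_true _ ▸ (fun h => hdmem ((PySem.Set.contains_iff _ _).1 h))
        rw [if_neg (by rw [this]; exact Bool.false_ne_true)]
      simp only [pvF, hded]
      rw [List.map_append, List.map_singleton]
      congr 1
      · apply List.map_congr_left
        intro a ha
        have hap : a ≠ p1 := fun he => hdmem (he ▸ ha)
        rw [pvInner_append_ne ps (p1, p2) a hap]
      · have h0 : pvInner ps p1 = PySem.Dict.empty := pvInner_empty_of_not_mem ps p1 hmem
        have := pvInner_append_self ps (p1, p2)
        simp only at this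
        rw [this, h0]
        rfl

theorem pvFilterFold (l : List (String × String)) (d : PySem.Dict String (PySem.Dict String Int)) :
    l.foldl (fun d p => if p.1 == "" || p.2 == "" then d else pvNStep d p) d
      = (l.filter (fun p => !(p.1 == "") && !(p.2 == ""))).foldl pvNStep d := by
  induction l generalizing d with
  | nil => rfl
  | cons p t ih =>
    simp only [List.foldl_cons, List.filter_cons]
    by_cases h : (p.1 == "" || p.2 == "") = true
    · have h2 : (!(p.1 == "") && !(p.2 == "")) = false := by
        rcases Bool.or_eq_true_iff.1 h with h' | h' <;> simp [h']
      rw [if_pos h, h2]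
      simp only [Bool.false_eq_true, if_false]
      exact ih d
    · have h2 : (!(p.1 == "") && !(p.2 == "")) = true := by
        simp only [Bool.or_eq_true_iff, not_or] at h
        simp [Bool.not_eq_true _ ▸ h.1, h.2]
      rw [if_neg h, h2]
      simp only [if_true]
      rw [ih, List.foldl_cons]

theorem pvPairs (xs : List String) :
    (PySem.List.pyRange 0 (PySem.List.len xs - 1) 1).map
      (fun i => (PySem.List.pyGetD xs i "", PySem.List.pyGetD xs (i + 1) "")) = xs.zip xs.tail := by
  rw [PySem.List.pyRange_one, List.map_map]
  apply List.ext_getElem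
  · simp [PySem.List.len, List.length_zip]
  · intro i h1 h2
    simp only [List.getElem_map, List.getElem_range, List.getElem_zip, List.getElem_tail, Function.comp]
    have hlen : (((PySem.List.len xs - 1) - 0).toNat) = xs.length - 1 := by
      simp [PySem.List.len]
    rw [List.length_map, List.length_range, hlen] at h1
    have hi : i < xs.length := by omega
    have hi1 : i + 1 < xs.length := by omega
    have e1 : ((0 : Int) + (i : Int)) = ((i : Nat) : Int) := by omega
    have e2 : ((i : Int) + 1) = (((i + 1 : Nat)) : Int) := by push_cast; omega
    rw [e1, e2, PySem.List.pyGetD_natCast, PySem.List.pyGetD_natCast,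
      List.getD_eq_getElem _ _ hi, List.getD_eq_getElem _ _ hi1]

theorem pvAB_eq (xs : List String) : build_transition_counts xs = build_transition_counts_alt xs := by
  unfold build_transition_counts
  show ((PySem.List.pyRange 0 (PySem.List.len xs - 1) 1).foldl
      (fun d i => (fun (d : PySem.Dict String (PySem.Dict String Int)) (p : String × String) =>
          if p.1 == "" || p.2 == "" then d else pvNStep d p) d
        ((fun i => (PySem.List.pyGetD xs i "", PySem.List.pyGetD xs (i + 1) "")) i))
      PySem.Dict.empty).items.map (fun kv => (kv.1, kv.2.items))
    = build_transition_counts_alt xs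
  have hfm := (List.foldl_map
    (f := fun i => (PySem.List.pyGetD xs i "", PySem.List.pyGetD xs (i + 1) ""))
    (g := fun (d : PySem.Dict String (PySem.Dict String Int)) (p : String × String) =>
      if p.1 == "" || p.2 == "" then d else pvNStep d p)
    (l := PySem.List.pyRange 0 (PySem.List.len xs - 1) 1)
    (init := PySem.Dict.empty)).symm
  rw [hfm, pvPairs, pvFilterFold, pvMain]
  unfold build_transition_counts_alt
  rw [PySem.List.slice_from_one]
  simp only [pvF, pvInner, List.map_map]
  rfl

-- ===== VERDICT (by name: the statement is the Claim_ definition above) =====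
theorem build_transition_counts_spec : Claim_equal_build_transition_counts := by
  intro ordered_states _
  unfold Spec_build_transition_counts
  exact pvAB_eq ordered_states
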